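-- pv_equiv track=rewrite | github.com/RK0429/ModernMath | scripts/visualization/add_mermaid_links.py | determine_link_path
-- ===== SOURCE A (Python) =====
-- from typing import List, Tuple, Optional, Set
--
-- def determine_link_path(node_id: str) -> Optional[str]:
--     """
--     Determine the relative path for a node ID based on naming conventions.
--     """
--     # Skip special node IDs
--     if node_id.startswith("class ") or node_id in ["graph", "TD", "LR", "TB", "BT", "RL"]:
--         return None
--
--     # Standard mathematical concept file patterns
--     patterns = ["def-", "thm-", "ex-", "ax-", "prop-", "lem-", "cor-"]
--
--     # Check if node_id matches any standard pattern
--     for pattern in patterns: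
--         if node_id.startswith(pattern):
--             return f"{node_id}.html"
--
--     return None
-- ===== SOURCE B (Python) =====
-- PREFIXES = {"def", "thm", "ex", "ax", "prop", "lem", "cor"}
-- SPECIAL = ["graph", "TD", "LR", "TB", "BT", "RL"]
--
-- def determine_link_path(node_id: str):
--     """Map node ID to relative HTML link path (partition + set lookup)."""
--     if node_id.startswith("class ") or node_id in SPECIAL:
--         return None
--     head, sep, _ = node_id.partition("-")
--     if sep and head in PREFIXES:
--         return f"{node_id}.html"
--     return None
-- ===== Notes on version B (the rewrite author's own statement) =====
-- stated objective: idiomatic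
-- what changed: Replaces the linear scan over seven dash-terminated startswith tests with a single partition at the first dash followed by one set lookup of the extracted head.
import Mathlib
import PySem

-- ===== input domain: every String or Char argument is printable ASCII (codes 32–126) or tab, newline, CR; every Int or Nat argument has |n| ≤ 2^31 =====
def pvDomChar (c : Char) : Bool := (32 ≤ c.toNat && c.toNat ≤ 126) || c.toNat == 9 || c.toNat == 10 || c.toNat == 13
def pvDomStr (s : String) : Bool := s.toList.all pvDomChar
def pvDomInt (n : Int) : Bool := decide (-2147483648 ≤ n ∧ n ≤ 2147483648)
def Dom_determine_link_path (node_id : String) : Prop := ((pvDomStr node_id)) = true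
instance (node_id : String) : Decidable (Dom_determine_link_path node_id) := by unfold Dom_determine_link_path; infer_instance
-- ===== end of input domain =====

-- B replaces A's linear scan over seven dash-terminated startswith tests with one partition
-- at the first dash plus a single set lookup of the extracted head (idiomatic; same cost class).


-- ===== PORT A =====
-- the 'for pattern in patterns' loop: first matching startswith wins
def dlpLoop (node_id : String) : List String → Option String
  | [] => none
  | p :: rest =>
      if PySem.Str.startswith node_id p then some (node_id ++ ".html")
      else dlpLoop node_id rest

def determine_link_path (node_id : String) : Option String :=
  if PySem.Str.startswith node_id "class " ||
     decide (node_id ∈ ["graph", "TD", "LR", "TB", "BT", "RL"]) then none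
  else
    dlpLoop node_id ["def-", "thm-", "ex-", "ax-", "prop-", "lem-", "cor-"]

-- ===== PORT B =====
-- node_id.partition('-') ported by hand (exact): head = chars before the first '-',
-- sep nonempty iff '-' occurs; strings are List Char per the type convention.
def determine_link_path_alt (node_id : String) : Option String :=
  if PySem.Str.startswith node_id "class " ||
     decide (node_id ∈ ["graph", "TD", "LR", "TB", "BT", "RL"]) then none
  else
    -- sep nonempty ↔ '-' occurs; head = chars before the first '-'
    if node_id.toList.contains '-' &&
       decide (node_id.toList.takeWhile (· ≠ '-') ∈
         ["def".toList, "thm".toList, "ex".toList, "ax".toList,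
          "prop".toList, "lem".toList, "cor".toList]) then
      some (node_id ++ ".html")
    else none

-- ===== PRECONDITION & SPEC =====
def Spec_determine_link_path (node_id : String) (out : Option String) : Prop := out = determine_link_path_alt node_id
instance (node_id : String) (out : Option String) : Decidable (Spec_determine_link_path node_id out) := by unfold Spec_determine_link_path; infer_instance

-- ===== CLAIM (what is proved, stated in full; the proofs are below) =====
def Claim_equal_determine_link_path : Prop := ∀ (node_id : String), Dom_determine_link_path node_id → Spec_determine_link_path node_id (determine_link_path node_id)

-- ===== LEMMAS AND PROOFS =====

-- startswith (p ++ "-") ↔ the part before the first '-' is exactly p (and a '-' exists)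
theorem prefix_dash_iff (p : List Char) (hp : '-' ∉ p) (l : List Char) :
    (p ++ ['-']) <+: l ↔ (l.takeWhile (· ≠ '-') = p ∧ '-' ∈ l) := by
  induction p generalizing l with
  | nil =>
      cases l with
      | nil => simp
      | cons c t =>
          by_cases hc : c = '-'
          · simp [List.takeWhile, hc]
          · simp [List.takeWhile, hc, List.cons_prefix_cons, Ne.symm hc]
  | cons a p' ih =>
      have ha : a ≠ '-' := fun h => hp (h ▸ List.mem_cons_self)
      have hp' : '-' ∉ p' := fun h => hp (List.mem_cons_of_mem _ h)
      cases l with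
      | nil => simp
      | cons c t =>
          by_cases hc : c = '-'
          · subst hc
            simp only [List.takeWhile]
            simp [List.cons_prefix_cons, ha]
          · simp [List.takeWhile, hc, List.cons_prefix_cons, ih hp' t, and_assoc,
              eq_comm (a := a) (b := c)]
            exact fun _ _ h => absurd h.symm hc

theorem sw_dash_eq (s : String) (pat : String) (p : List Char)
    (hpat : pat.toList = p ++ ['-']) (hp : '-' ∉ p) :
    PySem.Str.startswith s pat =
      (decide (s.toList.takeWhile (· ≠ '-') = p) && s.toList.contains '-') := by
  rw [Bool.eq_iff_iff]
  simp only [PySem.Str.startswith_eq, hpat, PySem.Chars.startswith_iff,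
    Bool.and_eq_true, decide_eq_true_eq, List.contains_eq_mem]
  exact (prefix_dash_iff p hp _).trans (by simp)

theorem determine_link_path_eq (node_id : String) :
    determine_link_path node_id = determine_link_path_alt node_id := by
  by_cases hguard : (PySem.Str.startswith node_id "class " ||
      decide (node_id ∈ ["graph", "TD", "LR", "TB", "BT", "RL"])) = true
  · unfold determine_link_path determine_link_path_alt
    rw [if_pos hguard, if_pos hguard]
  · simp only [determine_link_path, determine_link_path_alt, hguard, if_false,
      Bool.false_eq_true, dlpLoop]
    rw [sw_dash_eq node_id "def-" "def".toList (by decide) (by decide),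
        sw_dash_eq node_id "thm-" "thm".toList (by decide) (by decide),
        sw_dash_eq node_id "ex-" "ex".toList (by decide) (by decide),
        sw_dash_eq node_id "ax-" "ax".toList (by decide) (by decide),
        sw_dash_eq node_id "prop-" "prop".toList (by decide) (by decide),
        sw_dash_eq node_id "lem-" "lem".toList (by decide) (by decide),
        sw_dash_eq node_id "cor-" "cor".toList (by decide) (by decide)]
    cases hm : node_id.toList.contains '-'
    · simp
    · simp only [Bool.and_true, Bool.true_and]
      split_ifs <;> simp_all

-- ===== VERDICT (by name: the statement is the Claim_ definition above) =====
theorem determine_link_path_spec : Claim_equal_determine_link_path := by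
  intro node_id _
  unfold Spec_determine_link_path
  exact determine_link_path_eq node_id
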